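-- pv_equiv track=rewrite | github.com/cleopatterson/trade_onboarding | scripts/analyse_categories.py | detect_industry_column
-- ===== SOURCE A (Python) =====
-- def detect_industry_column(fieldnames: list[str]) -> str | None:
--     """Auto-detect the industry/category column name."""
--     candidates = ["industry", "industries", "category", "categories", "trade", "trades"]
--     for name in fieldnames:
--         if name.lower().strip() in candidates:
--             return name
--     # Fuzzy: any column containing "industr" or "categor"
--     for name in fieldnames:
--         nl = name.lower()
--         if "industr" in nl or "categor" in nl:
--             return name
--     return None
-- ===== SOURCE B (Python) =====
-- def detect_industry_column(fieldnames: list[str]) -> str | None: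
--     """Auto-detect the industry/category column name (single pass)."""
--     candidates = ["industry", "industries", "category", "categories", "trade", "trades"]
--     fuzzy = None
--     for name in fieldnames:
--         nl = name.lower()
--         if nl.strip() in candidates:
--             return name
--         if fuzzy is None and ("industr" in nl or "categor" in nl):
--             fuzzy = name
--     return fuzzy
-- ===== Notes on version B (the rewrite author's own statement) =====
-- stated objective: alternative
-- what changed: One single pass with a deferred fuzzy-match accumulator replaces A's two sequential scans (exact scan, then fuzzy scan).
import Mathlib
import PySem

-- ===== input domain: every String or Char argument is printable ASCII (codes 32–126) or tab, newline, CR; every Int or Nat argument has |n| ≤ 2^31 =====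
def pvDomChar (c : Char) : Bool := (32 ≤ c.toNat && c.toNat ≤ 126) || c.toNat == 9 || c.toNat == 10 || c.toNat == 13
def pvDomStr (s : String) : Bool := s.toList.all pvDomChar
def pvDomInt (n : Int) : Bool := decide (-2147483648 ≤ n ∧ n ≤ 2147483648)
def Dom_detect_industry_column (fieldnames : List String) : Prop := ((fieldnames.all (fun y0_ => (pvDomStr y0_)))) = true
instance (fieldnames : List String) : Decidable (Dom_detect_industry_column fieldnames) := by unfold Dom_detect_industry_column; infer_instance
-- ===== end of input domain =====

-- B replaces A's two sequential scans by one pass with a deferred fuzzy-match accumulator (alternative decomposition, same cost).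

-- ===== PORT A =====
def pvCandidates : List String := ["industry", "industries", "category", "categories", "trade", "trades"]

-- first loop of A: first name whose lower().strip() is a candidate
def pvExactLoop : List String → Option String
  | [] => none
  | name :: rest =>
    if pvCandidates.contains (PySem.Str.strip (PySem.Str.lower name)) then some name
    else pvExactLoop rest

-- second loop of A: first name whose lower() contains "industr" or "categor"
def pvFuzzyLoop : List String → Option String
  | [] => none
  | name :: rest =>
    let nl := PySem.Str.lower name
    if PySem.Str.isIn "industr" nl || PySem.Str.isIn "categor" nl then some name
    else pvFuzzyLoop rest

def detect_industry_column (fieldnames : List String) : Option String :=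
  match pvExactLoop fieldnames with
  | some name => some name
  | none => pvFuzzyLoop fieldnames

-- ===== PORT B =====
-- single pass: return immediately on an exact match, remember the first fuzzy match
def pvOnePass (fuzzy : Option String) : List String → Option String
  | [] => fuzzy
  | name :: rest =>
    let nl := PySem.Str.lower name
    if pvCandidates.contains (PySem.Str.strip nl) then some name
    else
      pvOnePass
        (if fuzzy.isNone && (PySem.Str.isIn "industr" nl || PySem.Str.isIn "categor" nl)
         then some name else fuzzy)
        rest

def detect_industry_column_alt (fieldnames : List String) : Option String :=
  pvOnePass none fieldnames

-- ===== PRECONDITION & SPEC =====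
def Spec_detect_industry_column (fieldnames : List String) (out : Option String) : Prop := out = detect_industry_column_alt fieldnames
instance (fieldnames : List String) (out : Option String) : Decidable (Spec_detect_industry_column fieldnames out) := by unfold Spec_detect_industry_column; infer_instance

-- ===== CLAIM (what is proved, stated in full; the proofs are below) =====
def Claim_equal_detect_industry_column : Prop := ∀ (fieldnames : List String), Dom_detect_industry_column fieldnames → Spec_detect_industry_column fieldnames (detect_industry_column fieldnames)

-- ===== LEMMAS AND PROOFS =====

-- invariant of B's single pass: exact matches win; otherwise an already-recorded fuzzy
-- candidate wins; otherwise fall back to A's fuzzy scan of the remainder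
theorem pvOnePass_eq (fuzzy : Option String) (fs : List String) :
    pvOnePass fuzzy fs =
      match pvExactLoop fs with
      | some name => some name
      | none => match fuzzy with
        | some f => some f
        | none => pvFuzzyLoop fs := by
  induction fs generalizing fuzzy with
  | nil => cases fuzzy <;> simp [pvOnePass, pvExactLoop, pvFuzzyLoop]
  | cons name rest ih =>
    cases fuzzy with
    | none =>
      simp only [pvOnePass, pvExactLoop, pvFuzzyLoop, Option.isNone_none, Bool.true_and, ih]
      split_ifs <;> cases pvExactLoop rest <;> rfl
    | some f =>
      simp only [pvOnePass, pvExactLoop, Option.isNone_some, Bool.false_and,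
        Bool.false_eq_true, if_false, ih]
      split_ifs <;> cases pvExactLoop rest <;> rfl

-- ===== VERDICT (by name: the statement is the Claim_ definition above) =====
theorem detect_industry_column_spec : Claim_equal_detect_industry_column := by
  intro fs _
  unfold Spec_detect_industry_column detect_industry_column detect_industry_column_alt
  rw [pvOnePass_eq]
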